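-- pv_equiv track=rewrite | github.com/jayantsolanki/EPIJudgePython | epi_judge_python/8-05-sunset_view.py | examine_buildings_with_sunset_v3
-- ===== SOURCE A (Python) =====
-- from typing import Iterator, List
--
-- def examine_buildings_with_sunset_v3(sequence: Iterator[int]) -> List[int]: #returns the indices
--     candidates = []
--     running_max = float("-Inf")
--     for building_idx, building_height in enumerate(sequence):#accesses original index but in reverse
--         if building_height > running_max:
--             candidates.append(building_idx)
--             running_max = building_height
--     # return [c for c in reversed(candidates)]
--     return [c for c in candidates]
-- ===== SOURCE B (Python) =====
-- from typing import Iterator, List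
--
-- def examine_buildings_with_sunset_v3(sequence: Iterator[int]) -> List[int]:
--     # Two-pass variant: build a prefix-maximum table, then emit index 0 and
--     # every index where the prefix maximum strictly increases.
--     heights = list(sequence)
--     if not heights:
--         return []
--     acc = []
--     m = heights[0]
--     for h in heights:
--         m = max(m, h)
--         acc.append(m)
--     out = [0]
--     i = 1
--     for prev, cur in zip(acc, acc[1:]):
--         if cur > prev:
--             out.append(i)
--         i += 1
--     return out
-- ===== Notes on version B (the rewrite author's own statement) =====
-- stated objective: alternative
-- what changed: Replaces the single enumerate loop carrying a float('-Inf') running max and conditional appends by a two-pass design: first materialise a prefix-maximum table, then scan adjacent pairs of that table emitting index 0 plus every index of strict increase.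
import Mathlib
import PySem

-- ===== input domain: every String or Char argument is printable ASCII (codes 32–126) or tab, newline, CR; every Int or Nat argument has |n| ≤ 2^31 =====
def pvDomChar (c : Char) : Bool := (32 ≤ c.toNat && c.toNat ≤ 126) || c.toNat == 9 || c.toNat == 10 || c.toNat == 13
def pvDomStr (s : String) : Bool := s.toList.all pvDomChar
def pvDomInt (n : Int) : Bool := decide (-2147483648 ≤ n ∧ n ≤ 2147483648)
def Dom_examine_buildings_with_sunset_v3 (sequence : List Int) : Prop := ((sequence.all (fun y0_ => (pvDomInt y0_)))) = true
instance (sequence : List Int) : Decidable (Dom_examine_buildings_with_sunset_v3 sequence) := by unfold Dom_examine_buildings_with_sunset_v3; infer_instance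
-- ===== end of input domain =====

-- B replaces A's single running-max loop by a prefix-maximum table plus a strict-increase scan (alternative decomposition, same cost).
-- ===== PORT A =====
-- running_max : Option Int, none = float("-Inf") (every Int compares greater than it)
def pvGoA (idx : Int) (rm : Option Int) : List Int → List Int
  | [] => []
  | h :: t =>
    if (match rm with | none => true | some m => decide (m < h)) then
      idx :: pvGoA (idx + 1) (some h) t
    else
      pvGoA (idx + 1) rm t

def examine_buildings_with_sunset_v3 (sequence : List Int) : List Int :=
  pvGoA 0 none sequence

-- ===== PORT B =====
-- prefix-maximum table: `for h in heights: m = max(m, h); acc.append(m)` (m starts at heights[0])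
def pvPrefixMax (m : Int) : List Int → List Int
  | [] => []
  | h :: t => max m h :: pvPrefixMax (max m h) t

-- `for prev, cur in zip(acc, acc[1:]): if cur > prev: out.append(i)`, i starting at 1
def pvIncScan (i : Int) : List Int → List Int
  | prev :: cur :: t => if prev < cur then i :: pvIncScan (i + 1) (cur :: t) else pvIncScan (i + 1) (cur :: t)
  | _ => []

def examine_buildings_with_sunset_v3_alt (sequence : List Int) : List Int :=
  match sequence with
  | [] => []
  | h :: _ => 0 :: pvIncScan 1 (pvPrefixMax h sequence)

-- ===== PRECONDITION & SPEC =====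
def Spec_examine_buildings_with_sunset_v3 (sequence : List Int) (out : List Int) : Prop := out = examine_buildings_with_sunset_v3_alt sequence
instance (sequence : List Int) (out : List Int) : Decidable (Spec_examine_buildings_with_sunset_v3 sequence out) := by unfold Spec_examine_buildings_with_sunset_v3; infer_instance

-- ===== CLAIM (what is proved, stated in full; the proofs are below) =====
def Claim_equal_examine_buildings_with_sunset_v3 : Prop := ∀ (sequence : List Int), Dom_examine_buildings_with_sunset_v3 sequence → Spec_examine_buildings_with_sunset_v3 sequence (examine_buildings_with_sunset_v3 sequence)

-- ===== LEMMAS AND PROOFS =====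

-- ===== VERDICT (by name: the statement is the Claim_ definition above) =====
-- Key invariant: scanning the prefix-max table for strict increases equals A's running-max loop.
theorem pvScan_eq_goA (t : List Int) : ∀ (i m : Int),
    pvIncScan i (m :: pvPrefixMax m t) = pvGoA i (some m) t := by
  induction t with
  | nil => intro i m; simp [pvIncScan, pvGoA, pvPrefixMax]
  | cons h t ih =>
    intro i m
    by_cases hc : m < h
    · simp [pvIncScan, pvGoA, pvPrefixMax, hc, max_eq_right (le_of_lt hc), ih]
    · simp [pvIncScan, pvGoA, pvPrefixMax, hc, max_eq_left (not_lt.mp hc), ih]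

theorem examine_buildings_with_sunset_v3_spec : Claim_equal_examine_buildings_with_sunset_v3 := by
  intro sequence _
  unfold Spec_examine_buildings_with_sunset_v3
  cases sequence with
  | nil => rfl
  | cons h t =>
    simp [examine_buildings_with_sunset_v3, examine_buildings_with_sunset_v3_alt,
      pvGoA, pvPrefixMax, pvScan_eq_goA]
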